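-- pv_equiv track=rewrite | github.com/mateusza/cboost | example3.py | max_of_ranges
-- ===== SOURCE A (Python) =====
-- def prod_of_range(a: int, b: int, m: int) -> int:
--     result: int = 1
--     for i in range(a, b+1):
--         result *= i
--         result %= m
--     return result
--
-- def max_of_ranges(size: int) -> int:
--     modulo: int = 777777
--     the_max: int = 0
--     for i in range(1, size):
--         for j in range(1, size):
--             p: int = prod_of_range(i, j, modulo)
--             if p > the_max:
--                 the_max = p
--     return the_max
-- ===== SOURCE B (Python) =====
-- def max_of_ranges(size: int) -> int:
--     m = 777777
--     best = 1 if size >= 2 else 0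
--     for i in range(1, size):
--         p = 1
--         for j in range(i, size):
--             p = p * j % m
--             if p > best:
--                 best = p
--     return best
-- ===== Notes on version B (the rewrite author's own statement) =====
-- stated objective: faster
-- what changed: For each fixed i the running product is maintained incrementally over j >= i (one multiply-mod per step) instead of recomputing prod_of_range from scratch for every pair; the j < i pairs, whose empty-range product is always one, are folded into the initial maximum whenever the loops run at all.
import Mathlib
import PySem

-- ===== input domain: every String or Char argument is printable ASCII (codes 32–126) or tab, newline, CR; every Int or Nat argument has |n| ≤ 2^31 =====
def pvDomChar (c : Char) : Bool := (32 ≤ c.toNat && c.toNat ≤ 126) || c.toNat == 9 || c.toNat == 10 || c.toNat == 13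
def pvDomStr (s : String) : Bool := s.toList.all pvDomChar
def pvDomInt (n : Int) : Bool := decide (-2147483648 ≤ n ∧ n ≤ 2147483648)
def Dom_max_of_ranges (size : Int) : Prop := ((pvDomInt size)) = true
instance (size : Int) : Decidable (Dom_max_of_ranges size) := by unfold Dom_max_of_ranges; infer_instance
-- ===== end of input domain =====

-- B replaces the per-pair recomputation of prod_of_range by one running product per fixed i
-- over j ≥ i (the j < i pairs all contribute 1, folded into the initial maximum); measured faster.

-- ===== PORT A =====
def prodOfRange (a b m : Int) : Int :=
  (PySem.List.pyRange a (b + 1) 1).foldl (fun result i => PySem.Int.mod (result * i) m) 1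

def max_of_ranges (size : Int) : Int :=
  (PySem.List.pyRange 1 size 1).foldl (fun the_max i =>
    (PySem.List.pyRange 1 size 1).foldl (fun the_max j =>
      let p := prodOfRange i j 777777
      if p > the_max then p else the_max) the_max) 0

-- ===== PORT B =====
def max_of_ranges_alt (size : Int) : Int :=
  let best : Int := if 2 ≤ size then 1 else 0
  (PySem.List.pyRange 1 size 1).foldl (fun best i =>
    ((PySem.List.pyRange i size 1).foldl (fun (st : Int × Int) j =>
      let p := PySem.Int.mod (st.1 * j) 777777
      (p, if p > st.2 then p else st.2)) (1, best)).2) best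

-- ===== PRECONDITION & SPEC =====
def Spec_max_of_ranges (size : Int) (out : Int) : Prop := out = max_of_ranges_alt size
instance (size : Int) (out : Int) : Decidable (Spec_max_of_ranges size out) := by unfold Spec_max_of_ranges; infer_instance

-- ===== CLAIM (what is proved, stated in full; the proofs are below) =====
def Claim_equal_max_of_ranges : Prop := ∀ (size : Int), Dom_max_of_ranges size → Spec_max_of_ranges size (max_of_ranges size)

-- ===== LEMMAS AND PROOFS =====

-- fold of running maximum of prodOfRange values (common shape of both inner loops)
def famax (i : Int) (l : List Int) (b : Int) : Int :=
  l.foldl (fun b j => max b (prodOfRange i j 777777)) b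

lemma ite_gt_eq_max (b p : Int) : (if p > b then p else b) = max b p := by
  rw [max_def]; split_ifs <;> omega

lemma famax_init_le (i : Int) (l : List Int) (b : Int) : b ≤ famax i l b := by
  induction l generalizing b with
  | nil => simp [famax]
  | cons x xs ih =>
    simp only [famax, List.foldl_cons] at *
    exact le_trans (le_max_left _ _) (ih _)

lemma famax_le_of_mem (i : Int) {l : List Int} {j : Int} (hj : j ∈ l) (b : Int) :
    prodOfRange i j 777777 ≤ famax i l b := by
  induction l generalizing b with
  | nil => cases hj
  | cons x xs ih =>
    rcases List.mem_cons.mp hj with h | h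
    · subst h
      exact le_trans (le_max_right _ _) (famax_init_le i xs _)
    · exact ih h _
lemma famax_max_init (i : Int) (l : List Int) (b c : Int) :
    famax i l (max b c) = max b (famax i l c) := by
  induction l generalizing c with
  | nil => simp [famax]
  | cons x xs ih =>
    simp only [famax, List.foldl_cons] at *
    rw [max_assoc, ih]

lemma famax_ones (i : Int) {l : List Int} (h : ∀ j ∈ l, prodOfRange i j 777777 = 1)
    (hne : l ≠ []) (b : Int) : famax i l b = max b 1 := by
  induction l generalizing b with
  | nil => cases hne rfl
  | cons x xs ih =>
    simp only [famax, List.foldl_cons]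
    rw [h x (List.mem_cons_self ..)]
    cases xs with
    | nil => rfl
    | cons y ys =>
      rw [show (List.foldl (fun b j => max b (prodOfRange i j 777777)) (max b 1) (y :: ys))
            = famax i (y :: ys) (max b 1) from rfl,
          ih (fun j hj => h j (List.mem_cons_of_mem _ hj)) (by simp)]
      rw [max_assoc, max_self]

lemma prodOfRange_empty {a b : Int} (m : Int) (h : b < a) : prodOfRange a b m = 1 := by
  unfold prodOfRange
  rw [PySem.List.pyRange_one_eq_nil (by omega)]
  rfl

lemma prodOfRange_succ {a b : Int} (m : Int) (h : a ≤ b) :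
    prodOfRange a b m = PySem.Int.mod (prodOfRange a (b - 1) m * b) m := by
  unfold prodOfRange
  rw [show b - 1 + 1 = b by ring, PySem.List.pyRange_one_succ_right h, List.foldl_append]
  rfl

-- B's inner loop: the first component tracks prodOfRange, the second the famax of the range
lemma innerB_run (i : Int) (n : Nat) : ∀ best : Int,
    ((PySem.List.pyRange i (i + n) 1).foldl (fun (st : Int × Int) j =>
        (PySem.Int.mod (st.1 * j) 777777, max st.2 (PySem.Int.mod (st.1 * j) 777777))) (1, best))
      = (prodOfRange i (i + n - 1) 777777, famax i (PySem.List.pyRange i (i + n) 1) best) := by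
  induction n with
  | zero =>
    intro best
    rw [show i + (0:Nat) = i by push_cast; ring]
    rw [PySem.List.pyRange_one_eq_nil (le_refl i)]
    simp only [famax, List.foldl_nil, Prod.mk.injEq]
    exact ⟨(prodOfRange_empty 777777 (by omega : i - 1 < i)).symm, trivial⟩
  | succ k ih =>
    intro best
    have hik : i ≤ i + (k : Int) := by omega
    have hsplit : PySem.List.pyRange i (i + ((k : Nat) + 1 : Nat)) 1
        = PySem.List.pyRange i (i + k) 1 ++ [i + k] := by
      rw [show (i + ((k : Nat) + 1 : Nat) : Int) = (i + (k:Int)) + 1 by push_cast; ring]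
      exact PySem.List.pyRange_one_succ_right hik
    rw [hsplit, List.foldl_append, ih best]
    simp only [List.foldl_cons, List.foldl_nil, Prod.mk.injEq]
    refine ⟨?_, ?_⟩
    · rw [show i + ((k : Nat) + 1 : Nat) - 1 = i + (k:Int) by push_cast; ring]
      rw [prodOfRange_succ 777777 hik]
    · simp only [famax, List.foldl_append, List.foldl_cons, List.foldl_nil]
      rw [prodOfRange_succ 777777 hik]

lemma innerB_snd (i size best : Int) (h : i ≤ size) :
    ((PySem.List.pyRange i size 1).foldl (fun (st : Int × Int) j =>
        (PySem.Int.mod (st.1 * j) 777777, max st.2 (PySem.Int.mod (st.1 * j) 777777))) (1, best)).2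
      = famax i (PySem.List.pyRange i size 1) best := by
  have hn : size = i + ((size - i).toNat : Int) := by omega
  rw [hn, innerB_run i (size - i).toNat best]

lemma prodOfRange_one_one : prodOfRange 1 1 777777 = 1 := by decide

-- A's inner loop for i ≥ 2 splits into the j < i prefix (all values 1) and the j ≥ i part
lemma innerA_split {i size : Int} (h1 : 2 ≤ i) (h2 : i ≤ size) (b : Int) :
    famax i (PySem.List.pyRange 1 size 1) b = famax i (PySem.List.pyRange i size 1) (max b 1) := by
  rw [PySem.List.pyRange_one_append 1 i size (by omega) h2]
  simp only [famax, List.foldl_append]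
  have hpre : famax i (PySem.List.pyRange 1 i 1) b = max b 1 := by
    apply famax_ones
    · intro j hj
      have := (PySem.List.mem_pyRange_one).mp hj
      exact prodOfRange_empty 777777 (by omega)
    · have : (1:Int) ∈ PySem.List.pyRange 1 i 1 :=
        (PySem.List.mem_pyRange_one).mpr ⟨le_refl 1, by omega⟩
      intro hnil; rw [hnil] at this; cases this
  rw [show List.foldl (fun b j => max b (prodOfRange i j 777777)) b (PySem.List.pyRange 1 i 1)
        = famax i (PySem.List.pyRange 1 i 1) b from rfl, hpre]

-- tail of the outer loop (i ≥ 2): A's and B's steps coincide once best ≥ 1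
lemma outer_tail (size : Int) (l : List Int) (hl : ∀ i ∈ l, 2 ≤ i ∧ i < size) :
    ∀ b : Int, 1 ≤ b →
    l.foldl (fun b i => famax i (PySem.List.pyRange 1 size 1) b) b
      = l.foldl (fun b i => famax i (PySem.List.pyRange i size 1) b) b := by
  induction l with
  | nil => intro b _; rfl
  | cons x xs ih =>
    intro b hb
    obtain ⟨hx2, hxs⟩ := hl x (List.mem_cons_self ..)
    simp only [List.foldl_cons]
    rw [innerA_split hx2 (by omega) b, max_eq_left hb]
    exact ih (fun i hi => hl i (List.mem_cons_of_mem _ hi)) _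
      (le_trans hb (famax_init_le _ _ _))

lemma foldl_peel (f : Int → Int → Int) {l : List Int} {x : Int} {xs : List Int}
    (h : l = x :: xs) (b : Int) : l.foldl f b = xs.foldl f (f b x) := by
  rw [h]; rfl

-- rewrite both ports into famax shape
lemma portA_eq (size : Int) :
    max_of_ranges size
      = (PySem.List.pyRange 1 size 1).foldl
          (fun b i => famax i (PySem.List.pyRange 1 size 1) b) 0 := by
  unfold max_of_ranges famax
  congr 1
  funext b i
  congr 1
  funext b j
  exact ite_gt_eq_max b (prodOfRange i j 777777)

lemma portB_eq (size : Int) :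
    max_of_ranges_alt size
      = (PySem.List.pyRange 1 size 1).foldl
          (fun b i => famax i (PySem.List.pyRange i size 1) b)
          (if 2 ≤ size then 1 else 0) := by
  unfold max_of_ranges_alt
  show ((PySem.List.pyRange 1 size 1).foldl (fun best i =>
      ((PySem.List.pyRange i size 1).foldl (fun (st : Int × Int) j =>
        (PySem.Int.mod (st.1 * j) 777777,
          if PySem.Int.mod (st.1 * j) 777777 > st.2 then PySem.Int.mod (st.1 * j) 777777 else st.2))
        (1, best)).2) (if 2 ≤ size then 1 else 0)) = _
  apply PySem.List.foldl_congr_mem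
  intro b i hi
  have hi' := (PySem.List.mem_pyRange_one).mp hi
  rw [show (fun (st : Int × Int) j =>
        (PySem.Int.mod (st.1 * j) 777777,
          if PySem.Int.mod (st.1 * j) 777777 > st.2 then PySem.Int.mod (st.1 * j) 777777 else st.2))
      = (fun (st : Int × Int) j =>
        (PySem.Int.mod (st.1 * j) 777777, max st.2 (PySem.Int.mod (st.1 * j) 777777))) by
      funext st j; rw [ite_gt_eq_max]]
  exact innerB_snd i size b (by omega)

-- ===== VERDICT (by name: the statement is the Claim_ definition above) =====
theorem max_of_ranges_spec : Claim_equal_max_of_ranges := by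
  intro size _
  unfold Spec_max_of_ranges
  rw [portA_eq, portB_eq]
  by_cases hs : 2 ≤ size
  · rw [if_pos hs]
    have hc : PySem.List.pyRange 1 size 1 = 1 :: PySem.List.pyRange 2 size 1 := by
      rw [PySem.List.pyRange_one_cons (by omega : (1:Int) < size)]
      norm_num
    rw [foldl_peel _ hc 0, foldl_peel _ hc 1]
    have hmem1 : (1:Int) ∈ PySem.List.pyRange 1 size 1 :=
      (PySem.List.mem_pyRange_one).mpr ⟨le_refl 1, by omega⟩
    have hge1 : 1 ≤ famax 1 (PySem.List.pyRange 1 size 1) 0 := by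
      have := famax_le_of_mem 1 hmem1 0
      rw [prodOfRange_one_one] at this; exact this
    have hfirst : famax 1 (PySem.List.pyRange 1 size 1) 1
        = famax 1 (PySem.List.pyRange 1 size 1) 0 := by
      have h := famax_max_init 1 (PySem.List.pyRange 1 size 1) 1 0
      rw [show max (1:Int) 0 = 1 from by decide] at h
      rw [h, max_eq_right hge1]
    show List.foldl _ (famax 1 (PySem.List.pyRange 1 size 1) 0) _
        = List.foldl _ (famax 1 (PySem.List.pyRange 1 size 1) 1) _
    rw [hfirst]
    exact outer_tail size (PySem.List.pyRange 2 size 1)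
      (fun i hi => by have := (PySem.List.mem_pyRange_one).mp hi; omega)
      _ hge1
  · rw [if_neg hs, PySem.List.pyRange_one_eq_nil (by omega : size ≤ 1)]
    rfl
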